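-- pv_equiv track=rewrite | github.com/nihadazimli/pyjooblaparser | pyjooblaparser/utils.py | modify_cluster_favor
-- ===== SOURCE A (Python) =====
-- from collections import OrderedDict
--
-- def modify_cluster_favor(skills_listing_must, skills_listing_good, intersection_list_must):
--     modified_skills_listing_good = {}
--     modified_skills_listing_must = {}
--     match_skill_counter = 0
--     modified_intersection_list_must = []
--     if len(skills_listing_must) > 10:
--         ordered_dict = OrderedDict(sorted(skills_listing_must.items(), key=lambda item: item[1],reverse=True))
--         top_dict = dict(ordered_dict.items())
--         for match_skill in intersection_list_must:
--             if match_skill_counter < 10: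
--                 try:
--                     top_dict.pop(match_skill)
--                     modified_intersection_list_must.append(match_skill)
--                     modified_skills_listing_must[match_skill] = skills_listing_must[match_skill]
--                     match_skill_counter += 1
--                 except:
--                     pass
--         while len(top_dict) > 10:
--             item_tuple = top_dict.popitem()
--             try:
--                 modified_skills_listing_good[item_tuple[0]] = item_tuple[1]
--             except:
--                 modified_skills_listing_good[item_tuple[0]] += item_tuple[1]
--
--     if len(skills_listing_must) < 2:
--         if len(skills_listing_good) > 1:
--             count = 0
--             for item in skills_listing_good:
--                 count += 1
--                 try:
--                     modified_skills_listing_must[item] = skills_listing_good[item]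
--                     modified_skills_listing_good[item] = None
--                 except:
--                     modified_skills_listing_must[item] += skills_listing_good[item]
--                     modified_skills_listing_good[item] = None
--                 if count == 10:
--                     break
--
--     return modified_skills_listing_must, modified_skills_listing_good, modified_intersection_list_must
-- ===== SOURCE B (Python) =====
-- def modify_cluster_favor(skills_listing_must, skills_listing_good, intersection_list_must):
--     if len(skills_listing_must) > 10:
--         ordered = sorted(skills_listing_must.items(), key=lambda kv: kv[1], reverse=True)
--         taken = set()
--         matched = []
--         for k in intersection_list_must:
--             if len(taken) < 10 and k not in taken and k in skills_listing_must:
--                 taken.add(k)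
--                 matched.append(k)
--         remaining = [kv for kv in ordered if kv[0] not in taken]
--         must_out = {k: skills_listing_must[k] for k in matched}
--         good_out = {k: v for k, v in reversed(remaining[10:])}
--         return must_out, good_out, matched
--     if len(skills_listing_must) < 2 and len(skills_listing_good) > 1:
--         picked = list(skills_listing_good.items())[:10]
--         return ({k: v for k, v in picked}, {k: None for k, _ in picked}, [])
--     return {}, {}, []
-- ===== Notes on version B (the rewrite author's own statement) =====
-- stated objective: simpler
-- what changed: Replaces the mutable top_dict popping, the while/popitem drain and the dead try/except arms with a pure pipeline: a taken-set scan of the intersection list, one filter over the descending-sorted items, a reversed slice for the overflow dict, and dict comprehensions; the len<2 branch becomes a plain first-10 slice.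
import Mathlib
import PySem

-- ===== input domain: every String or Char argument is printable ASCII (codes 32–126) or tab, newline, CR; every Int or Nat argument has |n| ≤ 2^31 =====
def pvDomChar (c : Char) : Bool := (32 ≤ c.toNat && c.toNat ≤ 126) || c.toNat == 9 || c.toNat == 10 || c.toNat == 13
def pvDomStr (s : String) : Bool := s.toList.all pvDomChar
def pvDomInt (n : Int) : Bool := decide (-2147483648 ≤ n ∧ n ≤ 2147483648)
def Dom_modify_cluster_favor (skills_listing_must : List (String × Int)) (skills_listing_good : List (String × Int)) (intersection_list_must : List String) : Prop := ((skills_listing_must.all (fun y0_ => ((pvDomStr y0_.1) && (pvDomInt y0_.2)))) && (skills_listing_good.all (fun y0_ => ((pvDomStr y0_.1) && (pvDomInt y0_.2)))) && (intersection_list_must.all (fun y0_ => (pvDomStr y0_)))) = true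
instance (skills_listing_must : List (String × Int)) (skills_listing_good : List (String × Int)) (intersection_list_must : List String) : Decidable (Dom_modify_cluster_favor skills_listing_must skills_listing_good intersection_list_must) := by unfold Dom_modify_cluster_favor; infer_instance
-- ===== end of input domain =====

-- B replaces A's mutable top_dict popping, while/popitem drain and dead try/except arms by a pure
-- pipeline (taken-set scan, one filter of the sorted items, a reversed slice, dict comprehensions);
-- objective: simpler. Equivalence of the RETURN value is proved below (neither mutates its arguments).

-- ===== PORT A =====
-- state: (top_dict, match_skill_counter, modified_skills_listing_must, modified_intersection_list_must)
def pvStepA (slm : PySem.Dict String Int)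
    (st : PySem.Dict String Int × Int × PySem.Dict String (Option Int) × List String)
    (k : String) :
    PySem.Dict String Int × Int × PySem.Dict String (Option Int) × List String :=
  if st.2.1 < 10 then
    match PySem.Dict.pop? st.1 k with
    | some (_, top') =>
        (top', st.2.1 + 1, st.2.2.1.insert k (some (PySem.Dict.getD slm k 0)), st.2.2.2 ++ [k])
    | none => st
  else st

-- the 'while len(top_dict) > 10: top_dict.popitem()' drain
def pvDrainA (top : PySem.Dict String Int) (good : PySem.Dict String (Option Int)) :
    PySem.Dict String (Option Int) :=
  if top.size > 10 then
    match top.items.getLast? with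
    | some kv => pvDrainA (PySem.Dict.mk top.items.dropLast) (good.insert kv.1 (some kv.2))
    | none => good
  else good
termination_by top.size
decreasing_by
  simp only [PySem.Dict.size, List.length_dropLast] at *
  omega

-- the counted 'for item in skills_listing_good' loop with its 'break' at count == 10
def pvLoop2A (items : List (String × Int)) (count : Int)
    (mm mg : PySem.Dict String (Option Int)) :
    PySem.Dict String (Option Int) × PySem.Dict String (Option Int) :=
  match items with
  | [] => (mm, mg)
  | (k, v) :: rest =>
      let count := count + 1
      let mm := mm.insert k (some v)
      let mg := mg.insert k none
      if count == 10 then (mm, mg) else pvLoop2A rest count mm mg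

def modify_cluster_favor (skills_listing_must : List (String × Int)) (skills_listing_good : List (String × Int)) (intersection_list_must : List String) : (List (String × Option Int)) × (List (String × Option Int)) × List String :=
  let slm := PySem.Dict.ofList skills_listing_must
  let slg := PySem.Dict.ofList skills_listing_good
  let stage1 :=
    if slm.size > 10 then
      let ordered := PySem.Dict.mk (PySem.List.sorted slm.items (fun kv => kv.2) (reverse := true))
      let st := intersection_list_must.foldl (pvStepA slm)
        (ordered, (0 : Int), (PySem.Dict.empty : PySem.Dict String (Option Int)), ([] : List String))
      let good := pvDrainA st.1 PySem.Dict.empty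
      (st.2.2.1, good, st.2.2.2)
    else ((PySem.Dict.empty : PySem.Dict String (Option Int)), (PySem.Dict.empty : PySem.Dict String (Option Int)), ([] : List String))
  let stage2 :=
    if slm.size < 2 then
      if slg.size > 1 then pvLoop2A slg.items 0 stage1.1 stage1.2.1
      else (stage1.1, stage1.2.1)
    else (stage1.1, stage1.2.1)
  (stage2.1.items, stage2.2.items, stage1.2.2)

-- ===== PORT B =====
-- state: (taken, matched)
def pvStepB (slm : PySem.Dict String Int)
    (st : PySem.Set String × List String) (k : String) : PySem.Set String × List String :=
  if st.1.length < 10 ∧ PySem.Set.contains st.1 k = false then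
    match PySem.Dict.get? slm k with
    | some _ => (PySem.Set.add st.1 k, st.2 ++ [k])
    | none => st
  else st

def modify_cluster_favor_alt (skills_listing_must : List (String × Int)) (skills_listing_good : List (String × Int)) (intersection_list_must : List String) : (List (String × Option Int)) × (List (String × Option Int)) × List String :=
  let slm := PySem.Dict.ofList skills_listing_must
  let slg := PySem.Dict.ofList skills_listing_good
  if slm.size > 10 then
    let ordered := PySem.List.sorted slm.items (fun kv => kv.2) (reverse := true)
    let st := intersection_list_must.foldl (pvStepB slm) (PySem.Set.empty, ([] : List String))
    let remaining := ordered.filter (fun kv => !(PySem.Set.contains st.1 kv.1))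
    let must_out := st.2.foldl
      (fun (d : PySem.Dict String (Option Int)) k => d.insert k (some (PySem.Dict.getD slm k 0)))
      PySem.Dict.empty
    let good_out := ((remaining.drop 10).reverse).foldl
      (fun (d : PySem.Dict String (Option Int)) kv => d.insert kv.1 (some kv.2)) PySem.Dict.empty
    (must_out.items, good_out.items, st.2)
  else if slm.size < 2 ∧ slg.size > 1 then
    let picked := slg.items.take 10
    let must_out := picked.foldl
      (fun (d : PySem.Dict String (Option Int)) kv => d.insert kv.1 (some kv.2)) PySem.Dict.empty
    let good_out := picked.foldl
      (fun (d : PySem.Dict String (Option Int)) kv => d.insert kv.1 (none : Option Int)) PySem.Dict.empty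
    (must_out.items, good_out.items, [])
  else ([], [], [])

-- ===== PRECONDITION & SPEC =====
def Spec_modify_cluster_favor (skills_listing_must : List (String × Int)) (skills_listing_good : List (String × Int)) (intersection_list_must : List String) (out : (List (String × Option Int)) × (List (String × Option Int)) × List String) : Prop := out = modify_cluster_favor_alt skills_listing_must skills_listing_good intersection_list_must
instance (skills_listing_must : List (String × Int)) (skills_listing_good : List (String × Int)) (intersection_list_must : List String) (out : (List (String × Option Int)) × (List (String × Option Int)) × List String) : Decidable (Spec_modify_cluster_favor skills_listing_must skills_listing_good intersection_list_must out) := by unfold Spec_modify_cluster_favor; infer_instance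

-- ===== CLAIM (what is proved, stated in full; the proofs are below) =====
def Claim_equal_modify_cluster_favor : Prop := ∀ (skills_listing_must : List (String × Int)) (skills_listing_good : List (String × Int)) (intersection_list_must : List String), Dom_modify_cluster_favor skills_listing_must skills_listing_good intersection_list_must → Spec_modify_cluster_favor skills_listing_must skills_listing_good intersection_list_must (modify_cluster_favor skills_listing_must skills_listing_good intersection_list_must)

-- ===== LEMMAS AND PROOFS =====


lemma pv_get?_filter_key (l : List (String × Int)) (q : String → Bool) (k : String) :
    PySem.Dict.get? (PySem.Dict.mk (l.filter (fun kv => q kv.1))) k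
      = if q k then PySem.Dict.get? (PySem.Dict.mk l) k else none := by
  induction l with
  | nil => simp [PySem.Dict.get?]
  | cons p t ih =>
    by_cases hpk : p.1 = k
    · subst hpk
      by_cases hq : q p.1
      · simp [PySem.Dict.get?, List.filter_cons, hq]
      · simp only [List.filter_cons, hq, Bool.false_eq_true, if_false]
        rw [ih]
        simp [PySem.Dict.get?, hq]
    · by_cases hq : q p.1
      · simp only [List.filter_cons, hq, if_true]
        rw [PySem.Dict.get?_mk_cons, PySem.Dict.get?_mk_cons]
        simp only [beq_iff_eq, hpk, if_false]
        exact ih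
      · simp only [List.filter_cons, hq, Bool.false_eq_true, if_false]
        rw [ih]
        rw [PySem.Dict.get?_mk_cons]
        simp [hpk]

lemma pv_get?_perm {l l' : List (String × Int)} (hp : l.Perm l')
    (hn : (l.map Prod.fst).Nodup) (k : String) :
    PySem.Dict.get? (PySem.Dict.mk l) k = PySem.Dict.get? (PySem.Dict.mk l') k := by
  have hn' : (l'.map Prod.fst).Nodup := ((hp.map Prod.fst).nodup_iff).mp hn
  have hk : (PySem.Dict.mk l).keys.Nodup := by simpa [PySem.Dict.keys] using hn
  have hk' : (PySem.Dict.mk l').keys.Nodup := by simpa [PySem.Dict.keys] using hn'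
  cases h : PySem.Dict.get? (PySem.Dict.mk l') k with
  | none =>
    rw [PySem.Dict.get?_eq_none_iff_not_mem_keys] at h ⊢
    simp only [PySem.Dict.keys] at h ⊢
    exact fun hm => h ((hp.map Prod.fst).mem_iff.mp hm)
  | some v =>
    have hm : (k, v) ∈ l' := by
      have := (PySem.Dict.get?_eq_some_iff_mem_items (d := PySem.Dict.mk l') (k := k) (v := v) hk').mp h
      simpa using this
    exact (PySem.Dict.get?_eq_some_iff_mem_items (d := PySem.Dict.mk l) (k := k) (v := v) hk).mpr
      (by simpa using hp.mem_iff.mpr hm)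

lemma pvStepB_m (slm : PySem.Dict String Int) (taken : PySem.Set String)
    (m : List String) (k : String) :
    pvStepB slm (taken, m) k
      = ((pvStepB slm (taken, []) k).1, m ++ (pvStepB slm (taken, []) k).2) := by
  simp only [pvStepB]
  split_ifs with h
  · cases hv : PySem.Dict.get? slm k <;> simp
  · simp

lemma pv_foldB_matched (slm : PySem.Dict String Int) :
    ∀ (ks : List String) (taken : PySem.Set String) (m : List String),
    ks.foldl (pvStepB slm) (taken, m)
      = ((ks.foldl (pvStepB slm) (taken, ([] : List String))).1,
          m ++ (ks.foldl (pvStepB slm) (taken, ([] : List String))).2) := by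
  intro ks
  induction ks with
  | nil => simp
  | cons k t ih =>
    intro taken m
    simp only [List.foldl_cons]
    rw [pvStepB_m slm taken m k]
    conv_rhs => rw [pvStepB_m slm taken [] k]
    rw [ih _ (m ++ _), ih _ ([] ++ _)]
    simp

lemma pv_drain (n : Nat) : ∀ (l : List (String × Int)) (good : PySem.Dict String (Option Int)),
    l.length ≤ n →
    pvDrainA (PySem.Dict.mk l) good
      = ((l.drop 10).reverse).foldl
          (fun (d : PySem.Dict String (Option Int)) kv => d.insert kv.1 (some kv.2)) good := by
  induction n with
  | zero =>
    intro l good hl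
    have : l = [] := List.eq_nil_of_length_eq_zero (Nat.le_zero.mp hl)
    subst this
    rw [pvDrainA]
    simp [PySem.Dict.size]
  | succ n ih =>
    intro l good hl
    by_cases h : l.length > 10
    · have hne : l ≠ [] := by intro h0; subst h0; simp at h
      rw [pvDrainA]
      have hlast : l.getLast? = some (l.getLast hne) := List.getLast?_eq_some_getLast hne
      simp only [PySem.Dict.size, PySem.Dict.items, h, if_true, hlast]
      rw [ih _ _ (by simp [List.length_dropLast]; omega)]
      have hsplit : l = l.dropLast ++ [l.getLast hne] := (List.dropLast_append_getLast hne).symm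
      conv_rhs => rw [hsplit]
      rw [List.drop_append_of_le_length (by simp [List.length_dropLast]; omega)]
      simp
    · rw [pvDrainA]
      have hd : l.drop 10 = [] := List.drop_eq_nil_of_le (by omega)
      simp [PySem.Dict.size, h, hd]


lemma pv_loop1 (D : PySem.Dict String Int) (hn : (D.items.map Prod.fst).Nodup)
    (O : List (String × Int)) (hp : O.Perm D.items) :
    ∀ (ks : List String) (taken : PySem.Set String)
      (mm : PySem.Dict String (Option Int)) (io : List String),
    ks.foldl (pvStepA D)
        (PySem.Dict.mk (O.filter (fun kv => !(PySem.Set.contains taken kv.1))),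
          (taken.length : Int), mm, io)
      = (PySem.Dict.mk (O.filter (fun kv =>
            !(PySem.Set.contains (ks.foldl (pvStepB D) (taken, [])).1 kv.1))),
          ((ks.foldl (pvStepB D) (taken, [])).1.length : Int),
          (ks.foldl (pvStepB D) (taken, [])).2.foldl
            (fun (d : PySem.Dict String (Option Int)) k =>
              d.insert k (some (PySem.Dict.getD D k 0))) mm,
          io ++ (ks.foldl (pvStepB D) (taken, [])).2) := by
  have hnO : (O.map Prod.fst).Nodup := ((hp.map Prod.fst).nodup_iff).mpr hn
  have hOget : ∀ x, PySem.Dict.get? (PySem.Dict.mk O) x = PySem.Dict.get? D x := by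
    intro x; exact pv_get?_perm hp hnO x
  intro ks
  induction ks with
  | nil => intro taken mm io; simp
  | cons k t ih =>
    intro taken mm io
    simp only [List.foldl_cons]
    have htop : PySem.Dict.get?
        (PySem.Dict.mk (O.filter (fun kv => !(PySem.Set.contains taken kv.1)))) k
        = if PySem.Set.contains taken k = false then PySem.Dict.get? D k else none := by
      rw [pv_get?_filter_key O (fun x => !(PySem.Set.contains taken x)) k]
      by_cases hc : PySem.Set.contains taken k = false <;> simp [hc, hOget]
    by_cases h10 : taken.length < 10
    · by_cases hc : PySem.Set.contains taken k = false
      · cases hv : PySem.Dict.get? D k with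
        | none =>
          have hA : pvStepA D
              (PySem.Dict.mk (O.filter (fun kv => !(PySem.Set.contains taken kv.1))),
                (taken.length : Int), mm, io) k
              = (PySem.Dict.mk (O.filter (fun kv => !(PySem.Set.contains taken kv.1))),
                (taken.length : Int), mm, io) := by
            simp only [pvStepA, PySem.Dict.pop?]
            rw [if_pos (by exact_mod_cast h10)]
            simp only [htop, hc, if_true, hv, Option.map_none]
          have hB : pvStepB D (taken, ([] : List String)) k = (taken, []) := by
            simp only [pvStepB]
            rw [if_pos ⟨h10, hc⟩, hv]
          rw [hA, hB]
          exact ih taken mm io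
        | some v =>
          have hmem : k ∉ taken := by simpa [PySem.Set.contains] using hc
          have hadd : PySem.Set.add taken k = taken ++ [k] := by
            simp [PySem.Set.add, PySem.Set.contains, hmem]
          have herase : (PySem.Dict.mk (O.filter (fun kv => !(PySem.Set.contains taken kv.1)))).erase k
              = PySem.Dict.mk (O.filter (fun kv => !(PySem.Set.contains (PySem.Set.add taken k) kv.1))) := by
            simp only [PySem.Dict.erase, List.filter_filter]
            congr 1
            apply List.filter_congr
            intro x _
            rw [hadd]
            simp only [PySem.Set.contains]
            by_cases hxk : x.1 = k
            · subst hxk; simp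
            · simp [hxk, List.mem_append]
          have hA : pvStepA D
              (PySem.Dict.mk (O.filter (fun kv => !(PySem.Set.contains taken kv.1))),
                (taken.length : Int), mm, io) k
              = (PySem.Dict.mk (O.filter (fun kv => !(PySem.Set.contains (PySem.Set.add taken k) kv.1))),
                  ((PySem.Set.add taken k).length : Int),
                  mm.insert k (some (PySem.Dict.getD D k 0)), io ++ [k]) := by
            simp only [pvStepA, PySem.Dict.pop?]
            rw [if_pos (by exact_mod_cast h10)]
            simp only [htop, hc, if_true, hv, Option.map_some]
            rw [herase]
            have : (PySem.Set.add taken k).length = taken.length + 1 := by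
              rw [hadd]; simp
            rw [this]
            push_cast
            rfl
          have hB : pvStepB D (taken, ([] : List String)) k = (PySem.Set.add taken k, [k]) := by
            simp only [pvStepB]
            rw [if_pos ⟨h10, hc⟩, hv]
            simp
          rw [hA, hB, pv_foldB_matched D t (PySem.Set.add taken k) [k]]
          rw [ih (PySem.Set.add taken k) (mm.insert k (some (PySem.Dict.getD D k 0))) (io ++ [k])]
          simp
      · -- k already taken: A finds nothing in the filtered dict, B's guard fails
        have hA : pvStepA D
            (PySem.Dict.mk (O.filter (fun kv => !(PySem.Set.contains taken kv.1))),
              (taken.length : Int), mm, io) k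
            = (PySem.Dict.mk (O.filter (fun kv => !(PySem.Set.contains taken kv.1))),
              (taken.length : Int), mm, io) := by
          have hct : PySem.Set.contains taken k = true := by simpa using hc
          simp only [pvStepA, PySem.Dict.pop?]
          rw [if_pos (by exact_mod_cast h10)]
          simp only [htop, hct]
          simp
        have hB : pvStepB D (taken, ([] : List String)) k = (taken, []) := by
          simp only [pvStepB]
          rw [if_neg (by tauto)]
        rw [hA, hB]
        exact ih taken mm io
    · -- counter full: both sides skip
      have hA : pvStepA D
          (PySem.Dict.mk (O.filter (fun kv => !(PySem.Set.contains taken kv.1))),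
            (taken.length : Int), mm, io) k
          = (PySem.Dict.mk (O.filter (fun kv => !(PySem.Set.contains taken kv.1))),
            (taken.length : Int), mm, io) := by
        simp only [pvStepA]
        rw [if_neg (by exact_mod_cast h10)]
      have hB : pvStepB D (taken, ([] : List String)) k = (taken, []) := by
        simp only [pvStepB]
        rw [if_neg (by tauto)]
      rw [hA, hB]
      exact ih taken mm io

lemma pv_loop2 : ∀ (items : List (String × Int)) (c : Int)
    (mm mg : PySem.Dict String (Option Int)), 0 ≤ c → c < 10 →
    pvLoop2A items c mm mg
      = (items.take (10 - c).toNat).foldl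
          (fun (s : PySem.Dict String (Option Int) × PySem.Dict String (Option Int)) kv =>
            (s.1.insert kv.1 (some kv.2), s.2.insert kv.1 none)) (mm, mg) := by
  intro items
  induction items with
  | nil => intro c mm mg h0 h10; simp [pvLoop2A]
  | cons kv rest ih =>
    intro c mm mg h0 h10
    obtain ⟨k, v⟩ := kv
    have htake : (10 - c).toNat = ((10 - (c+1)).toNat) + 1 := by omega
    rw [htake]
    simp only [List.take_succ_cons, List.foldl_cons]
    by_cases hc : c + 1 = 10
    · have : (10 - (c+1)).toNat = 0 := by omega
      rw [this]
      simp only [pvLoop2A, List.take_zero, List.foldl_nil]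
      simp [hc]
    · simp only [pvLoop2A]
      have hbeq : (c + 1 == (10:Int)) = false := by simpa using hc
      rw [hbeq]
      simp only [Bool.false_eq_true, if_false]
      exact ih (c+1) _ _ (by omega) (by omega)

-- ===== VERDICT (by name: the statement is the Claim_ definition above) =====
theorem modify_cluster_favor_spec : Claim_equal_modify_cluster_favor := by
  unfold Claim_equal_modify_cluster_favor
  intro slm_l slg_l ilm _dom
  unfold Spec_modify_cluster_favor
  show modify_cluster_favor slm_l slg_l ilm = modify_cluster_favor_alt slm_l slg_l ilm
  simp only [modify_cluster_favor, modify_cluster_favor_alt]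
  set D := PySem.Dict.ofList slm_l with hD
  set G := PySem.Dict.ofList slg_l with hG
  have hnD : (D.items.map Prod.fst).Nodup := by
    have := PySem.Dict.nodup_keys_ofList (ps := slm_l) (κ := String) (ν := Int)
    simpa [PySem.Dict.keys, hD] using this
  by_cases h : D.size > 10
  · have hp : (PySem.List.sorted D.items (fun kv => kv.2) (reverse := true)).Perm D.items :=
      PySem.List.sorted_perm _ _ _
    have hinit : (PySem.List.sorted D.items (fun kv => kv.2) (reverse := true)).filter
        (fun kv => !(PySem.Set.contains (PySem.Set.empty) kv.1))
        = PySem.List.sorted D.items (fun kv => kv.2) (reverse := true) := by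
      simp [PySem.Set.contains, PySem.Set.empty]
    have hl := pv_loop1 D hnD _ hp ilm PySem.Set.empty PySem.Dict.empty []
    rw [hinit] at hl
    have h2 : ¬ D.size < 2 := by omega
    simp only [h, if_true, h2, if_false]
    rw [show ((PySem.Set.empty : PySem.Set String).length : Int) = (0 : Int) by rfl] at hl
    rw [hl]
    rw [pv_drain (((PySem.List.sorted D.items (fun kv => kv.2) (reverse := true)).filter
        (fun kv => !(PySem.Set.contains (List.foldl (pvStepB D) (PySem.Set.empty, []) ilm).1 kv.1))).length) _ _ le_rfl]
    simp
  · have hnot : ¬ D.size > 10 := h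
    simp only [hnot, if_false]
    by_cases h2 : D.size < 2
    · by_cases h3 : G.size > 1
      · simp only [h2, h3, if_true, and_true, if_pos (⟨h2, h3⟩ : D.size < 2 ∧ G.size > 1)]
        rw [pv_loop2 G.items 0 PySem.Dict.empty PySem.Dict.empty (by omega) (by omega)]
        rw [show ((10 : Int) - 0).toNat = 10 by rfl]
        rw [PySem.List.foldl_prod_mk
          (f := fun (d : PySem.Dict String (Option Int)) (kv : String × Int) => d.insert kv.1 (some kv.2))
          (g := fun (d : PySem.Dict String (Option Int)) (kv : String × Int) => d.insert kv.1 (none : Option Int))]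
      · have : ¬ (D.size < 2 ∧ G.size > 1) := by tauto
        simp [h2, h3, this, PySem.Dict.empty]
    · have : ¬ (D.size < 2 ∧ G.size > 1) := by tauto
      simp [h2, this, PySem.Dict.empty]
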